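-- pv_equiv track=rewrite | github.com/lunalovecode/misc-problems | unfinished-problems/parity_sort.py | diff_between_parities
-- ===== SOURCE A (Python) =====
-- def diff_between_parities(lst):
--     even, odd = 0, 0
--     patt = []
--     for num in lst:
--         if num % 2 == 0:
--             even += 1
--             patt.append("E")
--         else:
--             odd += 1
--             patt.append("O")
--
--     if (len(patt) == 1 or abs(even - odd) <= 1) or (len(set(patt[::2])) == 1) and (len(set(patt[1::2])) == 1):
--         return "YES"
--     else:
--         return "NO"
-- ===== SOURCE B (Python) =====
-- def diff_between_parities(lst):
--     even = sum(1 for x in lst if x % 2 == 0)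
--     odd = len(lst) - even
--     if len(lst) == 1 or abs(even - odd) <= 1:
--         return "YES"
--     return "YES" if all(a % 2 == b % 2 for a, b in zip(lst, lst[2:])) else "NO"
-- ===== Notes on version B (the rewrite author's own statement) =====
-- stated objective: simpler
-- what changed: Counts evens in one comprehension instead of a three-accumulator loop, and replaces the build-a-tag-list + grouped-slice + set-size homogeneity test with a direct local period-2 check: every element has the same parity as the element two positions earlier (zip(lst, lst[2:])).
import Mathlib
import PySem

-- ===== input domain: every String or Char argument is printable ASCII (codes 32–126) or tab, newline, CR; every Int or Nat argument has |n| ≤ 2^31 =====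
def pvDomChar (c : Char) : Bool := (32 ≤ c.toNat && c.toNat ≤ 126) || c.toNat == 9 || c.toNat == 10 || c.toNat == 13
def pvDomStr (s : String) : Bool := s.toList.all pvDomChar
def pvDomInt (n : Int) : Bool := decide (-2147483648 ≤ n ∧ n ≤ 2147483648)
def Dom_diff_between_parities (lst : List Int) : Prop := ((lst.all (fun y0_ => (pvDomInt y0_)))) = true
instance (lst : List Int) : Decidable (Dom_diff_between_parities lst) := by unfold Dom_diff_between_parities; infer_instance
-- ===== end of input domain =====

-- B replaces A's tag-list + grouped-slice + set-size homogeneity test by a one-pass even count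
-- and a direct local period-2 parity check (zip(lst, lst[2:])); same values everywhere (simpler, not faster).

-- ===== PORT A =====
def diff_between_parities (lst : List Int) : String :=
  let s := lst.foldl
    (fun (acc : Int × Int × List String) num =>
      if PySem.Int.mod num 2 = 0 then (acc.1 + 1, acc.2.1, acc.2.2 ++ ["E"])
      else (acc.1, acc.2.1 + 1, acc.2.2 ++ ["O"]))
    (0, 0, [])
  let even := s.1
  let odd := s.2.1
  let patt := s.2.2
  if (patt.length = 1 ∨ |even - odd| ≤ 1) ∨
     (PySem.Set.len (PySem.Set.ofList ((PySem.List.slice? patt none none 2).getD [])) = 1 ∧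
      PySem.Set.len (PySem.Set.ofList ((PySem.List.slice? patt (some 1) none 2).getD [])) = 1)
  then "YES" else "NO"

-- ===== PORT B =====
def diff_between_parities_alt (lst : List Int) : String :=
  let even : Int := lst.foldl (fun acc x => if PySem.Int.mod x 2 = 0 then acc + 1 else acc) 0
  let odd : Int := (lst.length : Int) - even
  if (lst.length : Int) = 1 ∨ |even - odd| ≤ 1 then "YES"
  else if (lst.zip (PySem.List.slice lst (some 2) none)).all
            (fun p => PySem.Int.mod p.1 2 == PySem.Int.mod p.2 2) then "YES"
  else "NO"

-- ===== PRECONDITION & SPEC =====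
def Spec_diff_between_parities (lst : List Int) (out : String) : Prop := out = diff_between_parities_alt lst
instance (lst : List Int) (out : String) : Decidable (Spec_diff_between_parities lst out) := by unfold Spec_diff_between_parities; infer_instance

-- ===== CLAIM (what is proved, stated in full; the proofs are below) =====
def Claim_equal_diff_between_parities : Prop := ∀ (lst : List Int), Dom_diff_between_parities lst → Spec_diff_between_parities lst (diff_between_parities lst)

-- ===== LEMMAS AND PROOFS =====

def pvPar (x : Int) : Int := PySem.Int.mod x 2

def pvTag (x : Int) : String := if pvPar x = 0 then "E" else "O"

def pvEvery2 {α : Type} : List α → List α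
  | [] => []
  | [a] => [a]
  | a :: _ :: t => a :: pvEvery2 t

def pvChain2 : List Int → Bool
  | a :: b :: c :: t => (pvPar a == pvPar c) && pvChain2 (b :: c :: t)
  | _ => true

def pvAllEq : List Int → Bool
  | [] => true
  | a :: t => t.all (fun x => pvPar x == pvPar a)

-- A's fold computes (even count, length - even count, tag list); even count is B's fold.
theorem pvFoldShift (l : List Int) (a : Int) :
    l.foldl (fun acc x => if PySem.Int.mod x 2 = 0 then acc + 1 else acc) a
      = a + l.foldl (fun acc x => if PySem.Int.mod x 2 = 0 then acc + 1 else acc) 0 := by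
  induction l generalizing a with
  | nil => simp
  | cons x t ih =>
    simp only [List.foldl_cons]
    rw [ih, ih (if PySem.Int.mod x 2 = 0 then (0:Int) + 1 else 0)]
    split_ifs <;> ring

theorem pvFoldA (l : List Int) (e o : Int) (p : List String) :
    l.foldl
      (fun (acc : Int × Int × List String) num =>
        if PySem.Int.mod num 2 = 0 then (acc.1 + 1, acc.2.1, acc.2.2 ++ ["E"])
        else (acc.1, acc.2.1 + 1, acc.2.2 ++ ["O"]))
      (e, o, p)
    = (e + l.foldl (fun acc x => if PySem.Int.mod x 2 = 0 then acc + 1 else acc) 0,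
       o + ((l.length : Int) - l.foldl (fun acc x => if PySem.Int.mod x 2 = 0 then acc + 1 else acc) 0),
       p ++ l.map pvTag) := by
  induction l generalizing e o p with
  | nil => simp
  | cons x t ih =>
    simp only [List.foldl_cons, List.map_cons, List.length_cons]
    rw [pvFoldShift t (if PySem.Int.mod x 2 = 0 then (0:Int) + 1 else 0)]
    by_cases h : PySem.Int.mod x 2 = 0
    · rw [if_pos h, if_pos h, ih]
      simp only [Prod.mk.injEq]
      refine ⟨by ring, by push_cast; ring, by unfold pvTag pvPar; rw [if_pos h]; simp⟩
    · rw [if_neg h, if_neg h, ih]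
      simp only [Prod.mk.injEq]
      refine ⟨by ring, by push_cast; ring, by unfold pvTag pvPar; rw [if_neg h]; simp⟩

theorem pvEvery2_cons {α : Type} (x : α) (t : List α) :
    pvEvery2 (x :: t) = x :: pvEvery2 t.tail := by
  cases t <;> simp [pvEvery2]

theorem pvEvery2_map {α β : Type} (f : α → β) (l : List α) :
    pvEvery2 (l.map f) = (pvEvery2 l).map f := by
  induction l using pvEvery2.induct with
  | case1 => simp [pvEvery2]
  | case2 a => simp [pvEvery2]
  | case3 a b t ih => simp [pvEvery2, ih]

-- range/filterMap form of a step-2 slice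
theorem pvFMgen {α : Type} (xs : List α) :
    (List.range ((xs.length + 1)/2)).filterMap (fun k => xs[2*k]?) = pvEvery2 xs := by
  induction xs using pvEvery2.induct with
  | case1 => simp [pvEvery2]
  | case2 a => simp [pvEvery2]
  | case3 a b t ih =>
    have hlen : ((a :: b :: t).length + 1)/2 = (t.length + 1)/2 + 1 := by
      simp only [List.length_cons]; omega
    rw [hlen, List.range_succ_eq_map, List.filterMap_cons, List.filterMap_map]
    have hf : ((fun k => (a :: b :: t)[2*k]?) ∘ Nat.succ) = (fun k => t[2*k]?) := by
      funext k
      simp only [Function.comp]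
      have : 2 * Nat.succ k = 2 * k + 1 + 1 := by omega
      rw [this]
      simp
    rw [hf, ih]
    simp [pvEvery2]

theorem pvSlice2 {α : Type} (xs : List α) :
    PySem.List.slice? xs none none 2 = some (pvEvery2 xs) := by
  simp only [PySem.List.slice?, PySem.List.sliceIndices]
  norm_num
  have hc : (if 0 < xs.length then (((xs.length:Int) + 2 - 1)/2).toNat else 0) = (xs.length + 1)/2 := by
    split <;> omega
  have hf : (fun x : Nat => xs[((2:Int) * ↑x).toNat]?) = (fun k : Nat => xs[2*k]?) := by
    funext k
    have h1 : ((2:Int) * ↑k).toNat = 2*k := by omega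
    rw [h1]
  rw [hc, hf]
  exact pvFMgen xs

theorem pvSlice12 {α : Type} (xs : List α) :
    PySem.List.slice? xs (some 1) none 2 = some (pvEvery2 xs.tail) := by
  simp only [PySem.List.slice?, PySem.List.sliceIndices]
  norm_num
  match xs with
  | [] => simp [pvEvery2]
  | a :: t =>
    have hc : (if 1 < (a :: t).length then (((↑(a :: t).length:Int) - min 1 ↑(a :: t).length + 2 - 1) / 2).toNat else 0) = (t.length + 1)/2 := by
      simp only [List.length_cons]
      split <;> push_cast <;> omega
    have hf : (fun x : Nat => (a :: t)[(min 1 (↑(a :: t).length:Int) + 2 * ↑x).toNat]?) = (fun k : Nat => t[2*k]?) := by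
      funext k
      have h1 : (min 1 (↑(a :: t).length:Int) + 2 * ↑k).toNat = 2*k + 1 := by
        simp only [List.length_cons]; push_cast; omega
      rw [h1]
      simp
    rw [hc, hf]
    exact pvFMgen t

theorem pvSetLenOne {α : Type} [BEq α] [LawfulBEq α] (xs : List α) :
    (PySem.Set.ofList xs).length = 1 ↔ xs ≠ [] ∧ ∀ x ∈ xs, ∀ y ∈ xs, x = y := by
  constructor
  · intro h
    obtain ⟨a, ha⟩ := List.length_eq_one_iff.mp h
    constructor
    · intro hnil
      subst hnil
      simp [PySem.Set.ofList, PySem.Set.empty] at h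
    · intro x hx y hy
      have hx' : x ∈ PySem.Set.ofList xs := (PySem.Set.mem_ofList xs x).mpr hx
      have hy' : y ∈ PySem.Set.ofList xs := (PySem.Set.mem_ofList xs y).mpr hy
      rw [ha] at hx' hy'
      simp at hx' hy'
      rw [hx', hy']
  · rintro ⟨hnil, hall⟩
    obtain ⟨h, t, rfl⟩ := List.exists_cons_of_ne_nil hnil
    have hmem : h ∈ PySem.Set.ofList (h :: t) := (PySem.Set.mem_ofList _ h).mpr (by simp)
    have hsub : ∀ x ∈ PySem.Set.ofList (h :: t), x = h := by
      intro x hx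
      have := (PySem.Set.mem_ofList _ x).mp hx
      exact hall x this h (by simp)
    have hnd := PySem.Set.nodup_ofList (h :: t)
    match hS : PySem.Set.ofList (h :: t) with
    | [] => rw [hS] at hmem; simp at hmem
    | [a] => simp
    | a :: b :: r =>
      rw [hS] at hsub hnd
      have ha := hsub a (by simp)
      have hb := hsub b (by simp)
      rw [ha, hb] at hnd
      simp at hnd

theorem pvTag_eq_iff (x y : Int) : pvTag x = pvTag y ↔ pvPar x = pvPar y := by
  have hx := PySem.Int.mod_two_eq x
  have hy := PySem.Int.mod_two_eq y
  unfold pvTag pvPar at *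
  rcases hx with hx | hx <;> rcases hy with hy | hy <;> rw [hx, hy] <;> decide

-- set-size-1 of the tag list of a nonempty list = "all parities equal"
theorem pvCondA2 (l : List Int) (hl : l ≠ []) :
    PySem.Set.len (PySem.Set.ofList (l.map pvTag)) = 1 ↔ pvAllEq l = true := by
  obtain ⟨h, t, rfl⟩ := List.exists_cons_of_ne_nil hl
  have hlen : PySem.Set.len (PySem.Set.ofList ((h :: t).map pvTag)) = 1 ↔
      (PySem.Set.ofList ((h :: t).map pvTag)).length = 1 := by
    unfold PySem.Set.len; omega
  rw [hlen, pvSetLenOne]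
  simp only [pvAllEq, List.all_eq_true, beq_iff_eq]
  constructor
  · rintro ⟨-, hall⟩ x hx
    have hx' : pvTag x ∈ (h :: t).map pvTag := List.mem_map_of_mem (List.mem_cons_of_mem h hx)
    have hh' : pvTag h ∈ (h :: t).map pvTag := List.mem_map_of_mem List.mem_cons_self
    exact (pvTag_eq_iff x h).mp (hall _ hx' _ hh')
  · intro hall
    have hfor : ∀ z ∈ h :: t, pvPar z = pvPar h := by
      intro z hz
      rcases List.mem_cons.mp hz with rfl | hz'
      · rfl
      · exact hall z hz'
    refine ⟨by simp, ?_⟩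
    intro x hx y hy
    rw [List.mem_map] at hx hy
    obtain ⟨p, hp, rfl⟩ := hx
    obtain ⟨q, hq, rfl⟩ := hy
    rw [pvTag_eq_iff, hfor p hp, hfor q hq]

theorem pvAllEq_cons₂ (x y : Int) (l : List Int) :
    pvAllEq (x :: y :: l) = ((pvPar x == pvPar y) && pvAllEq (y :: l)) := by
  by_cases h : pvPar x = pvPar y
  · simp [pvAllEq, h]
  · have h1 : (pvPar y == pvPar x) = false := by simp; omega
    have h2 : (pvPar x == pvPar y) = false := by simp [h]
    simp [pvAllEq, h1, h2]

theorem pvChain2_eq (t : List Int) : ∀ a b : Int,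
    pvChain2 (a :: b :: t) = (pvAllEq (a :: pvEvery2 t) && pvAllEq (b :: pvEvery2 t.tail)) := by
  induction t using pvEvery2.induct with
  | case1 => intro a b; simp [pvChain2, pvAllEq, pvEvery2]
  | case2 c =>
    intro a b
    simp only [pvChain2, pvEvery2, List.tail_cons]
    rw [pvAllEq_cons₂]
    simp [pvAllEq]
  | case3 c d t' ih =>
    intro a b
    have h1 : pvChain2 (a :: b :: c :: d :: t') =
        ((pvPar a == pvPar c) && ((pvPar b == pvPar d) && pvChain2 (c :: d :: t'))) := by
      simp [pvChain2]
    rw [h1, ih c d]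
    simp only [pvEvery2, List.tail_cons]
    rw [pvEvery2_cons d t', pvAllEq_cons₂, pvAllEq_cons₂]
    rw [Bool.eq_iff_iff]
    simp only [Bool.and_eq_true]
    tauto

theorem pvZipAll_eq (l : List Int) :
    (l.zip (l.drop 2)).all (fun p => PySem.Int.mod p.1 2 == PySem.Int.mod p.2 2) = pvChain2 l := by
  induction l using pvChain2.induct with
  | case1 a b c t ih =>
    simp only [List.drop_succ_cons, List.drop_zero, List.zip_cons_cons, List.all_cons] at *
    rw [ih]
    simp [pvChain2, pvPar]
  | case2 l h =>
    rcases l with _ | ⟨a, _ | ⟨b, _ | ⟨c, t⟩⟩⟩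
    · simp [pvChain2]
    · simp [pvChain2]
    · simp [pvChain2]
    · exact (h a b c t rfl).elim

theorem pvSliceDrop2 (l : List Int) : PySem.List.slice l (some 2) none = l.drop 2 := by
  rw [PySem.List.slice_from _ (by norm_num : (0:Int) ≤ 2)]
  rfl

theorem pvKey (a b : Int) (t : List Int) :
    (PySem.Set.len (PySem.Set.ofList ((pvEvery2 (a :: b :: t)).map pvTag)) = 1 ∧
     PySem.Set.len (PySem.Set.ofList ((pvEvery2 (a :: b :: t).tail).map pvTag)) = 1) ↔
    ((a :: b :: t).zip (PySem.List.slice (a :: b :: t) (some 2) none)).all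
      (fun p => PySem.Int.mod p.1 2 == PySem.Int.mod p.2 2) = true := by
  rw [pvSliceDrop2, pvZipAll_eq]
  have e1 : pvEvery2 (a :: b :: t) = a :: pvEvery2 t := rfl
  have e2 : pvEvery2 (a :: b :: t).tail = b :: pvEvery2 t.tail := by
    simp only [List.tail_cons]
    exact pvEvery2_cons b t
  rw [e1, e2, pvCondA2 _ (by simp), pvCondA2 _ (by simp), pvChain2_eq t a b]
  simp [Bool.and_eq_true]

-- ===== VERDICT (by name: the statement is the Claim_ definition above) =====
theorem diff_between_parities_spec : Claim_equal_diff_between_parities := by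
  intro lst _
  unfold Spec_diff_between_parities diff_between_parities diff_between_parities_alt
  simp only [pvFoldA, zero_add, List.nil_append, pvSlice2, pvSlice12, Option.getD_some,
    ← List.map_tail, pvEvery2_map]
  set E := lst.foldl (fun acc x => if PySem.Int.mod x 2 = 0 then acc + 1 else acc) (0:Int) with hE
  by_cases h1 : ((lst.length : Int) = 1 ∨ |E - ((lst.length : Int) - E)| ≤ 1)
  · have hA : ((lst.map pvTag).length = 1 ∨ |E - ((lst.length : Int) - E)| ≤ 1) := by
      rcases h1 with h | h
      · left; rw [List.length_map]; omega
      · right; exact h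
    rw [if_pos (Or.inl hA), if_pos h1]
  · rw [if_neg h1]
    have hlen2 : 2 ≤ lst.length := by
      by_contra hc
      apply h1
      have h01 : lst.length = 0 ∨ lst.length = 1 := by omega
      rcases h01 with h0 | h0
      · right
        have : lst = [] := List.eq_nil_of_length_eq_zero h0
        rw [hE, this]
        simp
      · left; omega
    obtain ⟨a, t0, rfl⟩ : ∃ a t0, lst = a :: t0 := by
      rcases lst with _ | ⟨a, t0⟩
      · simp at hlen2
      · exact ⟨a, t0, rfl⟩
    obtain ⟨b, t, rfl⟩ : ∃ b t, t0 = b :: t := by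
      rcases t0 with _ | ⟨b, t⟩
      · simp at hlen2
      · exact ⟨b, t, rfl⟩
    by_cases h2 : ((a :: b :: t).zip (PySem.List.slice (a :: b :: t) (some 2) none)).all
        (fun p => PySem.Int.mod p.1 2 == PySem.Int.mod p.2 2) = true
    · rw [if_pos (Or.inr ((pvKey a b t).mpr h2)), if_pos h2]
    · rw [if_neg h2, if_neg ?_]
      intro hc
      rcases hc with hc | hc
      · apply h1
        rcases hc with hc | hc
        · left; rw [List.length_map] at hc; omega
        · right; exact hc
      · exact h2 ((pvKey a b t).mp hc)
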